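-- pv_equiv track=rewrite | github.com/akshatverma069/final_uss_code | backend/app/routers/security.py | get_password_issues
-- ===== SOURCE A (Python) =====
-- from typing import List, Dict, Any
--
-- def get_password_issues(password: str) -> List[str]:
--     """Get list of password issues"""
--     issues = []
--
--     if len(password) < 8:
--         issues.append("Password is too short (minimum 8 characters)")
--     if not any(c.isupper() for c in password):
--         issues.append("Missing uppercase letters")
--     if not any(c.islower() for c in password):
--         issues.append("Missing lowercase letters")
--     if not any(c.isdigit() for c in password):
--         issues.append("Missing numbers")
--     if not any(c in "!@#$%^&*()_+-=[]{}|;:,.<>?" for c in password):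
--         issues.append("Missing special characters")
--
--     return issues
-- ===== SOURCE B (Python) =====
-- def get_password_issues(password: str):
--     """Get list of password issues (single pass over the string)"""
--     n = 0
--     has_upper = has_lower = has_digit = has_special = False
--     for c in password:
--         n += 1
--         if c.isupper():
--             has_upper = True
--         elif c.islower():
--             has_lower = True
--         elif c.isdigit():
--             has_digit = True
--         elif c in "!@#$%^&*()_+-=[]{}|;:,.<>?":
--             has_special = True
--     issues = []
--     if n < 8:
--         issues.append("Password is too short (minimum 8 characters)")
--     if not has_upper:
--         issues.append("Missing uppercase letters")
--     if not has_lower: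
--         issues.append("Missing lowercase letters")
--     if not has_digit:
--         issues.append("Missing numbers")
--     if not has_special:
--         issues.append("Missing special characters")
--     return issues
-- ===== Notes on version B (the rewrite author's own statement) =====
-- stated objective: simpler
-- what changed: Replaces five separate any() generator scans of the password with a single pass maintaining four character-class flags and a length counter, then emits the messages in the same order.
import Mathlib
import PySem

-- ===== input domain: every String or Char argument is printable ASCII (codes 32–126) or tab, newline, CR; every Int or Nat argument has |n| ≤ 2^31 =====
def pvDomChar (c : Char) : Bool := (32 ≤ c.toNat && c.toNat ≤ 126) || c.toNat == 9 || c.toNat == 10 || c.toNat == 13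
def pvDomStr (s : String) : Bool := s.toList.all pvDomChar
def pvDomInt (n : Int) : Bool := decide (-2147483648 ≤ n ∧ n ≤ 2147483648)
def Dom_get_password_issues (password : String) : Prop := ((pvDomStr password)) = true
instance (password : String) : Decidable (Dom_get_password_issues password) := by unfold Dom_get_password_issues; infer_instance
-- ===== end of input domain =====

-- B replaces A's five separate any()-scans of the password by a single pass that
-- maintains four character-class flags and a length counter (objective: simpler).


-- the special-character literal from the source, as a list of chars
def pvSpecials : List Char := ['!','@','#','$','%','^','&','*','(',')','_','+','-','=','[',']','{','}','|',';',':',',','.','<','>','?']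

-- ===== PORT A =====
def get_password_issues (password : String) : List String :=
  let cs := password.toList
  let issues : List String := []
  let issues := if PySem.Str.len password < 8 then issues ++ ["Password is too short (minimum 8 characters)"] else issues
  let issues := if ¬ (cs.any (fun c => PySem.Chars.isupper c)) then issues ++ ["Missing uppercase letters"] else issues
  let issues := if ¬ (cs.any (fun c => PySem.Chars.islower c)) then issues ++ ["Missing lowercase letters"] else issues
  let issues := if ¬ (cs.any (fun c => PySem.Chars.isdigit c)) then issues ++ ["Missing numbers"] else issues
  let issues := if ¬ (cs.any (fun c => pvSpecials.contains c)) then issues ++ ["Missing special characters"] else issues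
  issues

-- ===== PORT B =====
-- one loop step of Source B: bump the length, set the first matching class flag
def pvStep (st : Int × Bool × Bool × Bool × Bool) (c : Char) : Int × Bool × Bool × Bool × Bool :=
  let n := st.1 + 1
  if PySem.Chars.isupper c then (n, true, st.2.2.1, st.2.2.2.1, st.2.2.2.2)
  else if PySem.Chars.islower c then (n, st.2.1, true, st.2.2.2.1, st.2.2.2.2)
  else if PySem.Chars.isdigit c then (n, st.2.1, st.2.2.1, true, st.2.2.2.2)
  else if pvSpecials.contains c then (n, st.2.1, st.2.2.1, st.2.2.2.1, true)
  else (n, st.2.1, st.2.2.1, st.2.2.2.1, st.2.2.2.2)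

def get_password_issues_alt (password : String) : List String :=
  let st := password.toList.foldl pvStep (0, false, false, false, false)
  let issues : List String := []
  let issues := if st.1 < 8 then issues ++ ["Password is too short (minimum 8 characters)"] else issues
  let issues := if !st.2.1 then issues ++ ["Missing uppercase letters"] else issues
  let issues := if !st.2.2.1 then issues ++ ["Missing lowercase letters"] else issues
  let issues := if !st.2.2.2.1 then issues ++ ["Missing numbers"] else issues
  let issues := if !st.2.2.2.2 then issues ++ ["Missing special characters"] else issues
  issues

-- ===== PRECONDITION & SPEC =====
def Spec_get_password_issues (password : String) (out : List String) : Prop := out = get_password_issues_alt password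
instance (password : String) (out : List String) : Decidable (Spec_get_password_issues password out) := by unfold Spec_get_password_issues; infer_instance

-- ===== CLAIM =====
def Claim_equal_get_password_issues : Prop := ∀ (password : String), Dom_get_password_issues password → Spec_get_password_issues password (get_password_issues password)

-- ===== LEMMAS AND PROOFS =====
theorem pv_spec_not_class : ∀ c ∈ pvSpecials, PySem.Chars.isupper c = false ∧ PySem.Chars.islower c = false ∧ PySem.Chars.isdigit c = false := by
  intro c hc; fin_cases hc <;> decide

theorem pv_upper_not : ∀ c, PySem.Chars.isupper c = true →
    PySem.Chars.islower c = false ∧ PySem.Chars.isdigit c = false ∧ pvSpecials.contains c = false := by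
  intro c h
  refine ⟨?_, ?_, ?_⟩
  · simp [PySem.Chars.isupper, PySem.Chars.islower, Char.le_def, UInt32.le_iff_toNat_le] at h ⊢
    omega
  · simp [PySem.Chars.isupper, PySem.Chars.isdigit, Char.le_def, UInt32.le_iff_toNat_le] at h ⊢
    omega
  · by_cases hm : c ∈ pvSpecials
    · have := (pv_spec_not_class c hm).1; simp [this] at h
    · simpa using hm

theorem pv_lower_not : ∀ c, PySem.Chars.islower c = true →
    PySem.Chars.isdigit c = false ∧ pvSpecials.contains c = false := by
  intro c h
  refine ⟨?_, ?_⟩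
  · simp [PySem.Chars.islower, PySem.Chars.isdigit, Char.le_def, UInt32.le_iff_toNat_le] at h ⊢
    omega
  · by_cases hm : c ∈ pvSpecials
    · have := (pv_spec_not_class c hm).2.1; simp [this] at h
    · simpa using hm

theorem pv_digit_not : ∀ c, PySem.Chars.isdigit c = true → pvSpecials.contains c = false := by
  intro c h
  by_cases hm : c ∈ pvSpecials
  · have := (pv_spec_not_class c hm).2.2; simp [this] at h
  · simpa using hm

-- loop invariant: B's single pass computes the length and the four any-scans
theorem pv_foldl_step (cs : List Char) : ∀ (n : Int) (hu hl hd hs : Bool),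
    cs.foldl pvStep (n, hu, hl, hd, hs) =
      (n + cs.length,
       hu || cs.any PySem.Chars.isupper,
       hl || cs.any PySem.Chars.islower,
       hd || cs.any PySem.Chars.isdigit,
       hs || cs.any (fun c => pvSpecials.contains c)) := by
  induction cs with
  | nil => intro n hu hl hd hs; simp
  | cons c cs ih =>
    intro n hu hl hd hs
    simp only [List.foldl_cons, List.any_cons, List.length_cons]
    by_cases h1 : PySem.Chars.isupper c = true
    · obtain ⟨e1, e2, e3⟩ := pv_upper_not c h1
      simp only [pvStep, h1, if_true, ih, h1, e1, e2, e3]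
      refine Prod.ext ?_ (by simp)
      push_cast; ring
    · by_cases h2 : PySem.Chars.islower c = true
      · obtain ⟨e2, e3⟩ := pv_lower_not c h2
        simp only [pvStep, h1, if_false, h2, if_true, ih, e2, e3]
        simp only [Bool.not_eq_true] at h1
        refine Prod.ext ?_ (by simp [h1])
        push_cast; ring
      · by_cases h3 : PySem.Chars.isdigit c = true
        · have e3 := pv_digit_not c h3
          simp only [pvStep, h1, h2, if_false, h3, if_true, ih, e3]
          simp only [Bool.not_eq_true] at h1 h2
          refine Prod.ext ?_ (by simp [h1, h2])
          push_cast; ring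
        · by_cases h4 : pvSpecials.contains c = true
          · simp only [pvStep, h1, h2, h3, if_false, h4, if_true, ih]
            simp only [Bool.not_eq_true] at h1 h2 h3
            refine Prod.ext ?_ (by simp [h1, h2, h3])
            push_cast; ring
          · simp only [pvStep, h1, h2, h3, h4, if_false, ih]
            simp only [Bool.not_eq_true] at h1 h2 h3 h4
            refine Prod.ext ?_ (by simp [h1, h2, h3, h4])
            push_cast; ring

-- ===== VERDICT =====
theorem get_password_issues_spec : Claim_equal_get_password_issues := by
  intro password _
  unfold Spec_get_password_issues get_password_issues get_password_issues_alt
  rw [pv_foldl_step]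
  simp [PySem.Str.len_eq, PySem.Chars.len_eq]
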